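-- pv_equiv track=rewrite | github.com/Yizhou-Jack/Leetcode-Python | Python/Leetcode/0209_findMinArrSizeContainsAllEle.py | solution
-- ===== SOURCE A (Python) =====
-- def solution(nums):
--     elementDict = {}
--     left = 0
--     right = 0
--     res = float('inf')
--     while right < len(nums):
--         value = elementDict.get(nums[right], 0)
--         if value == 0:
--             res = right-left+1
--         value += 1
--         elementDict[nums[right]] = value
--         while elementDict[nums[left]] > 1:
--             elementDict[nums[left]] -= 1
--             left += 1
--             res = min(res, right-left+1)
--         right += 1
--     if res == float('inf'): return len(nums)
--     return res
-- ===== SOURCE B (Python) =====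
-- def solution(nums):
--     # One pass tracking each value's last occurrence; a window ending at i that
--     # contains every distinct value minimally starts at min(last.values()).
--     need = len(set(nums))
--     last = {}
--     res = len(nums)
--     for i, v in enumerate(nums):
--         last[v] = i
--         if len(last) == need:
--             res = min(res, i - min(last.values()) + 1)
--     return res
-- ===== Notes on version B (the rewrite author's own statement) =====
-- stated objective: simpler
-- what changed: Replaces A's count-dict sliding window with inner shrink loop by a single pass that records each value's last occurrence in a dict and takes min(last.values()) as the window start once all distinct values have been seen.
import Mathlib
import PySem

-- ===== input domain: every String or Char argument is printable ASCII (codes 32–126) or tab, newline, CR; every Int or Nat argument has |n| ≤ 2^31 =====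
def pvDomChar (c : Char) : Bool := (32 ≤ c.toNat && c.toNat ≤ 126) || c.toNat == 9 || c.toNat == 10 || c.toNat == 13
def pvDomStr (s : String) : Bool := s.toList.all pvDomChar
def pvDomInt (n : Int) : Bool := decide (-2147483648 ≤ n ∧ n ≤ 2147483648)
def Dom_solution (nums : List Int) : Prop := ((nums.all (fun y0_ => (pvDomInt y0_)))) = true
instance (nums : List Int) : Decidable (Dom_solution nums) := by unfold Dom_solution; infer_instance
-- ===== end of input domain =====

-- B replaces A's count-based sliding window by a one-pass last-occurrence dict:
-- the minimal window ending at i starts at min(last.values()). Objective: simpler.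

-- ===== PORT A =====

-- min(res, x) where res is float('inf') or an int (none = inf)
def infMin (res : Option Int) (x : Int) : Option Int :=
  some (match res with | none => x | some k => min k x)

-- inner 'while elementDict[nums[left]] > 1' loop; fuel only makes the recursion total
-- (the loop advances left at most right-left ≤ len(nums) times per call).
-- 'elementDict[nums[left]]' is read with default 0 and 'd[k] -= 1' is Dict.modify:
-- the key is always present there (the dict holds the counts of the current window).
def solutionShrink (nums : List Int) (right : Int) :
    Nat → PySem.Dict Int Int × Int × Option Int → PySem.Dict Int Int × Int × Option Int
  | 0, st => st
  | fuel+1, (d, left, res) =>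
    if 1 < d.getD (PySem.List.pyGetD nums left 0) 0 then
      solutionShrink nums right fuel
        (d.modify (PySem.List.pyGetD nums left 0) 0 (· - 1), left + 1,
         infMin res (right - (left + 1) + 1))
    else (d, left, res)

-- one iteration of A's outer 'while right < len(nums)' loop
def solutionStep (nums : List Int) (n : Int)
    (st : PySem.Dict Int Int × Int × Option Int) (right : Int) :
    PySem.Dict Int Int × Int × Option Int :=
  let d := st.1
  let left := st.2.1
  let res := st.2.2
  let value := d.getD (PySem.List.pyGetD nums right 0) 0
  let res := if value = 0 then some (right - left + 1) else res
  let value := value + 1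
  let d := d.insert (PySem.List.pyGetD nums right 0) value
  solutionShrink nums right (n.toNat + 1) (d, left, res)

def solution (nums : List Int) : Int :=
  let n : Int := PySem.List.len nums
  let st := (PySem.List.pyRange 0 n 1).foldl (solutionStep nums n)
    (PySem.Dict.empty, 0, none)
  match st.2.2 with
  | none => n
  | some r => r

-- ===== PORT B =====

-- one iteration of B's 'for i, v in enumerate(nums)' loop
def solutionAltStep (need : Int) (st : PySem.Dict Int Int × Int) (p : Int × Int) :
    PySem.Dict Int Int × Int :=
  let last := st.1.insert p.2 p.1
  if (last.size : Int) = need then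
    -- min(last.values()): the list is nonempty (a key was just inserted)
    (last, min st.2 (p.1 - (PySem.List.min? last.values (fun y => y)).getD 0 + 1))
  else (last, st.2)

def solution_alt (nums : List Int) : Int :=
  let need : Int := PySem.Set.len (PySem.Set.ofList nums)
  let st := (PySem.List.enumerate nums 0).foldl (solutionAltStep need)
    (PySem.Dict.empty, PySem.List.len nums)
  st.2

-- ===== PRECONDITION & SPEC =====
def Spec_solution (nums : List Int) (out : Int) : Prop := out = solution_alt nums
instance (nums : List Int) (out : Int) : Decidable (Spec_solution nums out) := by unfold Spec_solution; infer_instance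

-- ===== CLAIM (what is proved, stated in full; the proofs are below) =====
def Claim_equal_solution : Prop := ∀ (nums : List Int), Dom_solution nums → Spec_solution nums (solution nums)

-- ===== LEMMAS AND PROOFS =====

-- last occurrence index of v in xs (none = absent)
def lastOcc? : List Int → Int → Option Nat
  | [], _ => none
  | a :: l, v =>
    match lastOcc? l v with
    | some j => some (j + 1)
    | none => if a = v then some 0 else none

theorem lastOcc?_append (xs : List Int) (x v : Int) :
    lastOcc? (xs ++ [x]) v = if x = v then some xs.length else lastOcc? xs v := by
  induction xs with
  | nil => by_cases hx : x = v <;> simp [lastOcc?, hx]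
  | cons a l ih =>
    show (match lastOcc? (l ++ [x]) v with
      | some j => some (j + 1) | none => if a = v then some 0 else none) = _
    rw [ih]
    by_cases hx : x = v <;> simp [hx, lastOcc?]

theorem lastOcc?_eq_none_iff (xs : List Int) (v : Int) : lastOcc? xs v = none ↔ v ∉ xs := by
  induction xs with
  | nil => simp [lastOcc?]
  | cons a l ih =>
    show (match lastOcc? l v with
      | some j => some (j + 1) | none => if a = v then some 0 else none) = none ↔ _
    cases h : lastOcc? l v with
    | some j =>
      have hv : v ∈ l := by by_contra hv; simp [ih.mpr hv] at h
      simp [hv]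
    | none => have := ih.mp h; by_cases ha : a = v <;> simp [ha, this]; tauto

theorem lastOcc?_spec (xs : List Int) (v : Int) (j : Nat) (h : lastOcc? xs v = some j) :
    j < xs.length ∧ xs.getD j 0 = v ∧ v ∉ xs.drop (j + 1) := by
  induction xs generalizing j with
  | nil => simp [lastOcc?] at h
  | cons a l ih =>
    have h' : (match lastOcc? l v with
      | some j => some (j + 1) | none => if a = v then some 0 else none) = some j := h
    cases hl : lastOcc? l v with
    | some j' =>
      rw [hl] at h'; simp at h'
      obtain ⟨h1, h2, h3⟩ := ih j' hl
      subst h'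
      refine ⟨by simpa using Nat.succ_lt_succ h1, by simpa using h2, by simpa using h3⟩
    | none =>
      rw [hl] at h'
      by_cases ha : a = v
      · simp [ha] at h'; subst h'
        exact ⟨by simp, by simp [ha], by simpa using (lastOcc?_eq_none_iff l v).mp hl⟩
      · simp [ha] at h'

theorem lastOcc?_ge (xs : List Int) (v : Int) (j i : Nat) (h : lastOcc? xs v = some j)
    (hi : i < xs.length) (hv : xs.getD i 0 = v) : i ≤ j := by
  obtain ⟨hj, _, hnd⟩ := lastOcc?_spec xs v j h
  by_contra hc
  rw [not_le] at hc
  apply hnd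
  have hij : j + 1 + (i - (j + 1)) = i := by omega
  have : (xs.drop (j + 1))[i - (j + 1)]'(by simp only [List.length_drop]; omega) = xs[i]'hi := by
    rw [List.getElem_drop]; congr 1
  rw [← hv, List.getD_eq_getElem xs 0 hi, ← this]
  exact List.getElem_mem _

theorem lastOcc?_eq_of (xs : List Int) (v : Int) (l : Nat) (hl : l < xs.length)
    (hv : xs.getD l 0 = v) (hnd : v ∉ xs.drop (l + 1)) : lastOcc? xs v = some l := by
  have hmem : v ∈ xs := by
    rw [← hv, List.getD_eq_getElem xs 0 hl]; exact List.getElem_mem _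
  cases h : lastOcc? xs v with
  | none => exact absurd ((lastOcc?_eq_none_iff xs v).mp h) (by simpa using hmem)
  | some j =>
    obtain ⟨hj, hgj, _⟩ := lastOcc?_spec xs v j h
    have hle : l ≤ j := lastOcc?_ge xs v j l h hl hv
    rcases Nat.eq_or_lt_of_le hle with he | hlt
    · rw [he]
    · exfalso; apply hnd
      have hij : l + 1 + (j - (l + 1)) = j := by omega
      have : (xs.drop (l + 1))[j - (l + 1)]'(by simp only [List.length_drop]; omega) = xs[j]'hj := by
        rw [List.getElem_drop]; congr 1
      rw [← hgj, List.getD_eq_getElem xs 0 hj, ← this]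
      exact List.getElem_mem _

theorem pyGetD_prefix (nums ys rest : List Int) (h : nums = ys ++ rest) (l : Int)
    (h0 : 0 ≤ l) (hl : l.toNat < ys.length) :
    PySem.List.pyGetD nums l 0 = ys.getD l.toNat 0 := by
  have hc : l = ((l.toNat : Nat) : Int) := (Int.toNat_of_nonneg h0).symm
  rw [hc, PySem.List.pyGetD_natCast, h]
  rw [List.getD_eq_getElem?_getD, List.getD_eq_getElem?_getD, List.getElem?_append_left hl]
  have h3 : ((l.toNat : Int)).toNat = l.toNat := by omega
  rw [h3]

theorem infMin_infMin (res : Option Int) (s1 s2 : Int) (h : s2 ≤ s1) :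
    infMin (infMin res s1) s2 = infMin res s2 := by
  cases res with
  | none => simp [infMin, min_eq_right h]
  | some k => simp [infMin, min_assoc, min_eq_right h]

theorem exists_idx_of_mem_drop {v : Int} {xs : List Int} {l : Nat} (h : v ∈ xs.drop l) :
    ∃ i, l ≤ i ∧ i < xs.length ∧ xs.getD i 0 = v := by
  obtain ⟨k, hk, he⟩ := List.getElem_of_mem h
  have hk' : l + k < xs.length := by simp only [List.length_drop] at hk; omega
  refine ⟨l + k, by omega, hk', ?_⟩
  rw [List.getD_eq_getElem _ _ hk', ← List.getElem_drop, he]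
  exact hk

theorem covered_iff (nums ys : List Int) (hsub : ∀ v ∈ ys, v ∈ nums) :
    (PySem.Set.ofList ys).length = (PySem.Set.ofList nums).length ↔ ∀ v ∈ nums, v ∈ ys := by
  have hs : (PySem.Set.ofList ys).Nodup := PySem.Set.nodup_ofList ys
  have ht : (PySem.Set.ofList nums).Nodup := PySem.Set.nodup_ofList nums
  have hsub' : PySem.Set.ofList ys ⊆ PySem.Set.ofList nums := by
    intro v hv
    exact (PySem.Set.mem_ofList _ _).mpr (hsub v ((PySem.Set.mem_ofList _ _).mp hv))
  constructor
  · intro hlen v hv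
    have hfin : (PySem.Set.ofList ys).toFinset ⊆ (PySem.Set.ofList nums).toFinset := by
      intro a ha; simp only [List.mem_toFinset] at *; exact hsub' ha
    have hcard : (PySem.Set.ofList nums).toFinset.card ≤ (PySem.Set.ofList ys).toFinset.card := by
      rw [List.toFinset_card_of_nodup hs, List.toFinset_card_of_nodup ht, hlen]
    have := Finset.eq_of_subset_of_card_le hfin hcard
    have hv' : v ∈ (PySem.Set.ofList nums).toFinset := by
      simp only [List.mem_toFinset]; exact (PySem.Set.mem_ofList _ _).mpr hv
    rw [← this] at hv'
    simp only [List.mem_toFinset] at hv'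
    exact (PySem.Set.mem_ofList _ _).mp hv'
  · intro hcov
    have hperm : (PySem.Set.ofList ys).Perm (PySem.Set.ofList nums) := by
      rw [List.perm_ext_iff_of_nodup hs ht]
      intro a
      simp only [PySem.Set.mem_ofList _ _]
      exact ⟨fun ha => hsub a ha, fun ha => hcov a ha⟩
    exact hperm.length_eq

theorem shrink_spec (nums ys rest : List Int) (hsplit : nums = ys ++ rest) :
    ∀ (fuel : Nat) (d : PySem.Dict Int Int) (left : Int) (res : Option Int),
    ys.length - left.toNat < fuel →
    0 ≤ left → left.toNat < ys.length →
    (∀ u, d.getD u 0 = ((ys.drop left.toNat).count u : Int)) →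
    (∀ v ∈ ys, v ∈ ys.drop left.toNat) →
    ∃ d' left' res',
      solutionShrink nums ((ys.length : Int) - 1) fuel (d, left, res) = (d', left', res') ∧
      left ≤ left' ∧ left'.toNat < ys.length ∧
      (∀ u, d'.getD u 0 = ((ys.drop left'.toNat).count u : Int)) ∧
      (∀ v ∈ ys, v ∈ ys.drop left'.toNat) ∧
      (ys.drop left'.toNat).count (ys.getD left'.toNat 0) = 1 ∧
      res' = (if left' = left then res else infMin res ((ys.length : Int) - left')) := by
  intro fuel
  induction fuel with
  | zero => intro d left res hfuel; omega
  | succ fuel ih =>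
    intro d left res hfuel h0 hlt hcnt hcov
    have hget : PySem.List.pyGetD nums left 0 = ys.getD left.toNat 0 :=
      pyGetD_prefix nums ys rest hsplit left h0 hlt
    have hhead : ys.drop left.toNat = ys.getD left.toNat 0 :: ys.drop (left.toNat + 1) := by
      conv_lhs => rw [List.drop_eq_getElem_cons hlt]
      rw [List.getD_eq_getElem _ _ hlt]
    show ∃ d' left' res',
      (if 1 < d.getD (PySem.List.pyGetD nums left 0) 0 then
        solutionShrink nums ((ys.length : Int) - 1) fuel
          (d.modify (PySem.List.pyGetD nums left 0) 0 (· - 1), left + 1,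
           infMin res ((ys.length : Int) - 1 - (left + 1) + 1))
      else (d, left, res)) = (d', left', res') ∧ _
    rw [hget, hcnt]
    by_cases hg : 1 < (((ys.drop left.toNat).count (ys.getD left.toNat 0) : Nat) : Int)
    · rw [if_pos hg]
      have hg' : 2 ≤ (ys.drop left.toNat).count (ys.getD left.toNat 0) := by exact_mod_cast hg
      have hlen2 : 2 ≤ (ys.drop left.toNat).length :=
        le_trans hg' (List.count_le_length)
      have hlt2 : left.toNat + 1 < ys.length := by
        simp only [List.length_drop] at hlen2; omega
      have htn : (left + 1).toNat = left.toNat + 1 := by omega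
      have hcnt2 : ∀ u', (d.modify (ys.getD left.toNat 0) 0 (· - 1)).getD u' 0 =
          ((ys.drop (left + 1).toNat).count u' : Int) := by
        intro u'
        rw [PySem.Dict.getD_modify, htn]
        by_cases hu : u' = ys.getD left.toNat 0
        · rw [if_pos hu, hcnt, hu]
          rw [hhead]
          simp
        · rw [if_neg hu, hcnt]
          rw [hhead]
          simp [List.count_cons]
          exact fun h => hu h.symm
      have hcov2 : ∀ v ∈ ys, v ∈ ys.drop (left.toNat + 1) := by
        intro v hv
        have hm := hcov v hv
        rw [hhead] at hm
        rcases List.mem_cons.mp hm with he | hm'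
        · subst he
          have hcv : 1 ≤ (ys.drop (left.toNat + 1)).count (ys.getD left.toNat 0) := by
            have h4 := hg'
            rw [hhead, List.count_cons_self] at h4
            omega
          exact List.count_pos_iff.mp (by omega)
        · exact hm'
      have hfuel2 : ys.length - (left + 1).toNat < fuel := by omega
      obtain ⟨d', left', res', heq, hle, hlt', hcnt', hcov', h1', hres'⟩ :=
        ih (d.modify (ys.getD left.toNat 0) 0 (· - 1)) (left + 1)
          (infMin res ((ys.length : Int) - 1 - (left + 1) + 1)) hfuel2 (by omega)
          (by rw [htn]; exact hlt2) hcnt2 (by rw [htn]; exact hcov2)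
      refine ⟨d', left', res', heq, by omega, hlt', hcnt', hcov', h1', ?_⟩
      have harith : (ys.length : Int) - 1 - (left + 1) + 1 = (ys.length : Int) - (left + 1) := by ring
      rw [harith] at hres'
      by_cases hcase : left' = left + 1
      · rw [hres', if_pos hcase, if_neg (by omega), hcase]
      · rw [hres', if_neg hcase, if_neg (by omega),
          infMin_infMin res _ _ (by have := hle; omega)]
    · rw [if_neg hg]
      refine ⟨d, left, res, rfl, le_refl left, hlt, hcnt, hcov, ?_, by simp⟩
      have h1 : 1 ≤ (ys.drop left.toNat).count (ys.getD left.toNat 0) := by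
        rw [hhead]; simp
      have h2 : ((ys.drop left.toNat).count (ys.getD left.toNat 0) : Int) ≤ 1 := by omega
      omega

-- invariant of A's state after processing the prefix xs
structure AInv (xs : List Int) (d : PySem.Dict Int Int) (left : Int) : Prop where
  left_nonneg : 0 ≤ left
  left_le : left.toNat ≤ xs.length
  counts : ∀ u, d.getD u 0 = ((xs.drop left.toNat).count u : Int)
  covers : ∀ v ∈ xs, v ∈ xs.drop left.toNat
  head1 : xs ≠ [] → left.toNat < xs.length ∧ (xs.drop left.toNat).count (xs.getD left.toNat 0) = 1

-- invariant of B's dict after processing the prefix xs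
structure BInv (xs : List Int) (last : PySem.Dict Int Int) : Prop where
  get : ∀ v, last.get? v = (lastOcc? xs v).map (fun j => (j : Int))
  keys : last.keys = PySem.Set.ofList xs

theorem min_values (xs : List Int) (last : PySem.Dict Int Int)
    (hget : ∀ v, last.get? v = (lastOcc? xs v).map (fun j => (j : Int)))
    (hkeys : last.keys = PySem.Set.ofList xs)
    (left : Int) (h0 : 0 ≤ left) (hlt : left.toNat < xs.length)
    (hcov : ∀ v ∈ xs, v ∈ xs.drop left.toNat)
    (h1 : (xs.drop left.toNat).count (xs.getD left.toNat 0) = 1) :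
    PySem.List.min? last.values (fun y => y) = some left := by
  have hnd : last.keys.Nodup := by rw [hkeys]; exact PySem.Set.nodup_ofList xs
  have hvals : ∀ w ∈ last.values, left ≤ w := by
    intro w hw
    simp only [PySem.Dict.values, List.mem_map] at hw
    obtain ⟨⟨k, w'⟩, hk, hw'⟩ := hw
    cases hw'
    have hg := PySem.Dict.get?_of_mem_items _ hk hnd
    rw [hget k] at hg
    cases hlo : lastOcc? xs k with
    | none => rw [hlo] at hg; simp at hg
    | some j =>
      rw [hlo] at hg; simp at hg
      obtain ⟨hjlen, hgj, _⟩ := lastOcc?_spec xs k j hlo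
      have hkmem : k ∈ xs := by
        rw [← hgj, List.getD_eq_getElem _ _ hjlen]; exact List.getElem_mem _
      obtain ⟨i, hi1, hi2, hi3⟩ := exists_idx_of_mem_drop (hcov k hkmem)
      have hij := lastOcc?_ge xs k j i hlo hi2 hi3
      omega
  have hh : xs.drop left.toNat = xs.getD left.toNat 0 :: xs.drop (left.toNat + 1) := by
    conv_lhs => rw [List.drop_eq_getElem_cons hlt]
    rw [List.getD_eq_getElem _ _ hlt]
  have hlmem : left ∈ last.values := by
    have hul : lastOcc? xs (xs.getD left.toNat 0) = some left.toNat := by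
      apply lastOcc?_eq_of xs _ left.toNat hlt rfl
      rw [hh, List.count_cons_self] at h1
      exact List.count_eq_zero.mp (by omega)
    have hgu : last.get? (xs.getD left.toNat 0) = some ((left.toNat : Nat) : Int) := by
      rw [hget _, hul]; rfl
    have humem : xs.getD left.toNat 0 ∈ xs := by
      rw [List.getD_eq_getElem _ _ hlt]; exact List.getElem_mem _
    have hukeys : xs.getD left.toNat 0 ∈ last.keys := by
      rw [hkeys]; exact (PySem.Set.mem_ofList _ _).mpr humem
    simp only [PySem.Dict.keys, List.mem_map] at hukeys
    obtain ⟨⟨k, w⟩, hkw, hk1⟩ := hukeys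
    have hgk : last.get? k = some w := PySem.Dict.get?_of_mem_items _ hkw hnd
    rw [show k = xs.getD left.toNat 0 from hk1, hgu] at hgk
    have hw : w = left := by
      have h5 := Option.some.inj hgk
      omega
    rw [← hw]
    simp only [PySem.Dict.values, List.mem_map]
    exact ⟨(k, w), hkw, rfl⟩
  cases hmin : PySem.List.min? last.values (fun y => y) with
  | none =>
    rw [PySem.List.min?_eq_none_iff] at hmin
    rw [hmin] at hlmem; simp at hlmem
  | some m =>
    have hm1 : m ∈ last.values := PySem.List.min?_mem hmin
    have hm2 := PySem.List.min?_isMin hmin left hlmem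
    have hle1 : left ≤ m := hvals m hm1
    have : m = left := le_antisymm hm2 hle1
    rw [this]

def LoopInv (nums xs : List Int) (stA : PySem.Dict Int Int × Int × Option Int)
    (stB : PySem.Dict Int Int × Int) : Prop :=
  AInv xs stA.1 stA.2.1 ∧ BInv xs stB.1 ∧
  (xs ≠ [] → ∃ k, stA.2.2 = some k ∧ k ≤ (xs.length : Int) - stA.2.1) ∧
  ((xs ≠ [] ∧ ∀ v ∈ nums, v ∈ xs) → stA.2.2 = some stB.2) ∧
  ((¬ ∀ v ∈ nums, v ∈ xs) → stB.2 = (nums.length : Int))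

theorem step_inv (nums xs rest : List Int) (x : Int) (hsplit : nums = (xs ++ [x]) ++ rest)
    (stA : PySem.Dict Int Int × Int × Option Int) (stB : PySem.Dict Int Int × Int)
    (hI : LoopInv nums xs stA stB) :
    LoopInv nums (xs ++ [x])
      (solutionStep nums (PySem.List.len nums) stA (xs.length : Int))
      (solutionAltStep (PySem.Set.len (PySem.Set.ofList nums)) stB ((xs.length : Int), x)) := by
  obtain ⟨d, left, res⟩ := stA
  obtain ⟨last, resB⟩ := stB
  obtain ⟨hA, hB, hR0, hR1, hR2⟩ := hI
  dsimp only at hA hB hR0 hR1 hR2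
  have hlen_ys : (xs ++ [x]).length = xs.length + 1 := by simp
  have hlen_le : xs.length + 1 ≤ nums.length := by rw [hsplit]; simp
  have hxnum : x ∈ nums := by rw [hsplit]; simp
  have hsub_ys : ∀ v ∈ xs ++ [x], v ∈ nums := by
    intro v hv; rw [hsplit]; exact List.mem_append_left _ hv
  have hget_x : PySem.List.pyGetD nums (xs.length : Int) 0 = x := by
    rw [pyGetD_prefix nums (xs ++ [x]) rest hsplit (xs.length : Int) (by positivity)
      (by simp)]
    simp
  have hdrop_ys : (xs ++ [x]).drop left.toNat = xs.drop left.toNat ++ [x] := by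
    rw [List.drop_append]
    have h6 : left.toNat - xs.length = 0 := by have := hA.left_le; omega
    rw [h6]
    simp
  have hcnt1 : ∀ u, (d.insert x (d.getD x 0 + 1)).getD u 0 =
      (((xs ++ [x]).drop left.toNat).count u : Int) := by
    intro u
    rw [PySem.Dict.getD_insert, hdrop_ys]
    by_cases hu : u = x
    · rw [if_pos hu, hA.counts, hu]
      simp [List.count_append]
    · rw [if_neg hu, hA.counts]
      simp [List.count_append, List.count_singleton]
      intro h; exact absurd h.symm hu
  have hcov1 : ∀ v ∈ xs ++ [x], v ∈ (xs ++ [x]).drop left.toNat := by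
    intro v hv
    rw [hdrop_ys]
    rcases List.mem_append.mp hv with hv | hv
    · exact List.mem_append_left _ (hA.covers v hv)
    · exact List.mem_append_right _ hv
  have hlt1 : left.toNat < (xs ++ [x]).length := by
    have := hA.left_le; rw [hlen_ys]; omega
  obtain ⟨d', left', res', heq, hle, hlt', hcnt', hcov', h1', hres'⟩ :=
    shrink_spec nums (xs ++ [x]) rest hsplit ((PySem.List.len nums).toNat + 1)
      (d.insert x (d.getD x 0 + 1)) left
      (if d.getD x 0 = 0 then some ((xs.length : Int) - left + 1) else res)
      (by
        simp only [List.length_append, List.length_cons, List.length_nil, PySem.List.len_eq]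
        omega) hA.left_nonneg hlt1 hcnt1 hcov1
  have hright : (((xs ++ [x]).length : Int) - 1) = (xs.length : Int) := by
    rw [hlen_ys]; push_cast; ring
  rw [hright] at heq
  have hstep : solutionStep nums (PySem.List.len nums) (d, left, res) (xs.length : Int) =
      (d', left', res') := by
    unfold solutionStep
    simp only [hget_x]
    exact heq
  -- B side
  have hBeq : solutionAltStep (PySem.Set.len (PySem.Set.ofList nums)) (last, resB)
      ((xs.length : Int), x) =
      (last.insert x (xs.length : Int),
        if (((last.insert x (xs.length : Int)).size : Nat) : Int) =
            PySem.Set.len (PySem.Set.ofList nums) then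
          min resB ((xs.length : Int) -
            (PySem.List.min? (last.insert x (xs.length : Int)).values (fun y => y)).getD 0 + 1)
        else resB) := by
    show (let l2 := last.insert x (xs.length : Int);
      if (l2.size : Int) = PySem.Set.len (PySem.Set.ofList nums) then
        (l2, min resB ((xs.length : Int) -
          (PySem.List.min? l2.values (fun y => y)).getD 0 + 1))
      else (l2, resB)) = _
    dsimp only
    by_cases h : (((last.insert x (xs.length : Int)).size : Nat) : Int) =
        PySem.Set.len (PySem.Set.ofList nums)
    · rw [if_pos h, if_pos h]
    · rw [if_neg h, if_neg h]
  have hBget : ∀ v, (last.insert x (xs.length : Int)).get? v =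
      (lastOcc? (xs ++ [x]) v).map (fun j => (j : Int)) := by
    intro v
    rw [PySem.Dict.get?_insert, lastOcc?_append]
    by_cases hv : v = x
    · rw [if_pos hv, if_pos hv.symm]; rfl
    · rw [if_neg hv, if_neg (fun h => hv h.symm), hB.get]
  have hBkeys : (last.insert x (xs.length : Int)).keys = PySem.Set.ofList (xs ++ [x]) := by
    rw [PySem.Set.ofList_append_singleton, PySem.Set.add_eq_ite]
    by_cases hx : x ∈ xs
    · have hmem : x ∈ PySem.Set.ofList xs := (PySem.Set.mem_ofList _ _).mpr hx
      have hcontains : last.contains x = true := by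
        rw [PySem.Dict.contains_iff_mem_keys, hB.keys]; exact hmem
      rw [PySem.Dict.keys_insert_of_contains _ _ hcontains, hB.keys, if_pos hmem]
    · have hmem : x ∉ PySem.Set.ofList xs := fun h => hx ((PySem.Set.mem_ofList _ _).mp h)
      have hcontains : last.contains x = false := by
        rw [Bool.eq_false_iff]
        intro h
        exact hmem (by rw [← hB.keys]; exact (PySem.Dict.contains_iff_mem_keys _ _).mp h)
      rw [PySem.Dict.keys_insert_of_not_contains _ _ hcontains, hB.keys, if_neg hmem]
  have hsize : ((last.insert x (xs.length : Int)).size : Nat) =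
      (PySem.Set.ofList (xs ++ [x])).length := by
    have h1 : (last.insert x (xs.length : Int)).keys.length =
        (last.insert x (xs.length : Int)).size := by
      simp only [PySem.Dict.keys, PySem.Dict.size, List.length_map]
    rw [← h1, hBkeys]
  have hlen_need : PySem.Set.len (PySem.Set.ofList nums) =
      ((PySem.Set.ofList nums).length : Int) := by
    simp [PySem.Set.len]
  have bcond : ((((last.insert x (xs.length : Int)).size : Nat) : Int) =
      PySem.Set.len (PySem.Set.ofList nums)) ↔ (∀ v ∈ nums, v ∈ xs ++ [x]) := by
    rw [hsize, hlen_need]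
    rw [show ((((PySem.Set.ofList (xs ++ [x])).length : Nat) : Int) =
        (((PySem.Set.ofList nums).length : Nat) : Int)) ↔
        ((PySem.Set.ofList (xs ++ [x])).length = (PySem.Set.ofList nums).length) from
      Int.natCast_inj]
    exact covered_iff nums (xs ++ [x]) hsub_ys
  have hminval : PySem.List.min? (last.insert x (xs.length : Int)).values (fun y => y) =
      some left' :=
    min_values (xs ++ [x]) _ hBget hBkeys left' (le_trans hA.left_nonneg hle) hlt' hcov' h1'
  -- generic facts about the A result
  have hR0' : ∃ k, res' = some k ∧ k ≤ ((xs ++ [x]).length : Int) - left' := by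
    by_cases hv0 : d.getD x 0 = 0
    · rw [if_pos hv0] at hres'
      by_cases hc : left' = left
      · refine ⟨(xs.length : Int) - left + 1, by rw [hres', if_pos hc], ?_⟩
        rw [hlen_ys, hc]; push_cast; omega
      · refine ⟨min ((xs.length : Int) - left + 1) (((xs ++ [x]).length : Int) - left'),
          by rw [hres', if_neg hc]; rfl, min_le_right _ _⟩
    · rw [if_neg hv0] at hres'
      have hxs_ne : xs ≠ [] := by
        intro h
        apply hv0
        rw [hA.counts, h]
        simp
      obtain ⟨k, hk, hkb⟩ := hR0 hxs_ne
      by_cases hc : left' = left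
      · refine ⟨k, by rw [hres', if_pos hc, hk], ?_⟩
        rw [hlen_ys, hc]; push_cast; omega
      · refine ⟨min k (((xs ++ [x]).length : Int) - left'),
          by rw [hres', if_neg hc, hk]; rfl, min_le_right _ _⟩
  unfold LoopInv
  rw [hstep, hBeq]
  dsimp only
  refine ⟨⟨le_trans hA.left_nonneg hle, le_of_lt hlt', hcnt', hcov',
    fun _ => ⟨hlt', h1'⟩⟩, ⟨hBget, hBkeys⟩, fun _ => hR0', ?_, ?_⟩
  · -- R1: covered → res' = some resB'
    rintro ⟨-, hcovy⟩
    rw [if_pos (bcond.mpr hcovy), hminval]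
    simp only [Option.getD_some]
    have harr : (xs.length : Int) - left' + 1 = (((xs ++ [x]).length : Int) - left') := by
      rw [hlen_ys]; push_cast; ring
    rw [harr]
    by_cases hcovx : ∀ v ∈ nums, v ∈ xs
    · have hxs_ne : xs ≠ [] := by
        intro h; rw [h] at hcovx; exact absurd (hcovx x hxnum) (List.not_mem_nil)
      have hres_eq : res = some resB := hR1 ⟨hxs_ne, hcovx⟩
      have hbound : resB ≤ (xs.length : Int) - left := by
        obtain ⟨k, hk, hkb⟩ := hR0 hxs_ne
        rw [hres_eq] at hk
        have : k = resB := (Option.some.inj hk).symm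
        omega
      have hv0 : d.getD x 0 ≠ 0 := by
        rw [hA.counts]
        have : x ∈ xs.drop left.toNat := hA.covers x (hcovx x hxnum)
        have := List.count_pos_iff.mpr this
        omega
      rw [if_neg hv0] at hres'
      by_cases hc : left' = left
      · rw [hres', if_pos hc, hres_eq, hc]
        have : min resB (((xs ++ [x]).length : Int) - left) = resB := by
          rw [min_eq_left]
          rw [hlen_ys]; push_cast; omega
        rw [this]
      · rw [hres', if_neg hc, hres_eq]
        simp [infMin]
    · have hxs_notin : x ∉ xs := by
        intro hxin
        apply hcovx
        intro v hv
        rcases List.mem_append.mp (hcovy v hv) with h | h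
        · exact h
        · rw [List.mem_singleton.mp h]; exact hxin
      have hv0 : d.getD x 0 = 0 := by
        rw [hA.counts]
        have : x ∉ xs.drop left.toNat := fun h => hxs_notin (List.mem_of_mem_drop h)
        simp [List.count_eq_zero.mpr this]
      have hresB : resB = (nums.length : Int) := hR2 hcovx
      rw [if_pos hv0] at hres'
      by_cases hc : left' = left
      · rw [hres', if_pos hc, hresB, hc]
        have h5 : ((xs ++ [x]).length : Int) - left ≤ (nums.length : Int) := by
          have := hA.left_nonneg; omega
        have harr2 : (xs.length : Int) - left + 1 = (((xs ++ [x]).length : Int) - left) := by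
          rw [hlen_ys]; push_cast; ring
        rw [harr2, min_eq_right h5]
      · rw [hres', if_neg hc, hresB]
        simp only [infMin]
        have h5 : ((xs ++ [x]).length : Int) - left' ≤ (nums.length : Int) := by
          have := le_trans hA.left_nonneg hle; omega
        have h6 : ((xs ++ [x]).length : Int) - left' ≤ (xs.length : Int) - left + 1 := by
          have hne : left < left' := lt_of_le_of_ne hle (fun h => hc h.symm)
          rw [hlen_ys]; push_cast; omega
        rw [min_eq_right h6, min_eq_right h5]
  · -- R2: not covered → resB unchanged
    intro hcovy
    have hcond : ¬ ((((last.insert x (xs.length : Int)).size : Nat) : Int) =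
        PySem.Set.len (PySem.Set.ofList nums)) := fun h => hcovy (bcond.mp h)
    rw [if_neg hcond]
    apply hR2
    intro hcovx
    exact hcovy (fun v hv => List.mem_append_left _ (hcovx v hv))

theorem fold_inv (nums : List Int) : ∀ (rest xs : List Int)
    (stA : PySem.Dict Int Int × Int × Option Int) (stB : PySem.Dict Int Int × Int),
    nums = xs ++ rest → LoopInv nums xs stA stB →
    LoopInv nums nums
      ((PySem.List.enumerate rest (xs.length : Int)).foldl
        (fun st p => solutionStep nums (PySem.List.len nums) st p.1) stA)
      ((PySem.List.enumerate rest (xs.length : Int)).foldl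
        (solutionAltStep (PySem.Set.len (PySem.Set.ofList nums))) stB) := by
  intro rest
  induction rest with
  | nil => intro xs stA stB h hI; simp at h; subst h; simpa [PySem.List.enumerate_nil] using hI
  | cons x rest ih =>
    intro xs stA stB h hI
    rw [PySem.List.enumerate_cons]
    simp only [List.foldl_cons]
    have h' : nums = (xs ++ [x]) ++ rest := by simpa using h
    have := step_inv nums xs rest x h' stA stB hI
    have happ : ((xs ++ [x]).length : Int) = (xs.length : Int) + 1 := by simp
    have := ih (xs ++ [x]) _ _ h' this
    rw [happ] at this
    exact this

theorem init_inv (nums : List Int) :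
    LoopInv nums [] (PySem.Dict.empty, 0, none) (PySem.Dict.empty, PySem.List.len nums) := by
  refine ⟨⟨le_refl 0, by simp, ?_, ?_, ?_⟩, ⟨?_, ?_⟩, ?_, ?_, ?_⟩ <;>
    simp [PySem.Dict.getD_empty, PySem.Dict.get?_empty, lastOcc?]

-- ===== VERDICT (by name: the statement is the Claim_ definition above) =====
theorem solutionA_eq (nums : List Int) :
    solution nums =
      (match ((PySem.List.enumerate nums 0).foldl
          (fun st p => solutionStep nums (PySem.List.len nums) st p.1)
          (PySem.Dict.empty, 0, none)).2.2 with
        | none => PySem.List.len nums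
        | some r => r) := by
  unfold solution
  rw [PySem.List.enumerate_eq_map_pyRange nums 0, List.foldl_map]

theorem solution_spec : Claim_equal_solution := by
  intro nums _
  have h := fold_inv nums nums [] _ _ (by simp) (init_inv nums)
  simp only [List.length_nil, Nat.cast_zero] at h
  rcases h with ⟨_, _, _, hR1, _⟩
  by_cases hn : nums = []
  · subst hn; rfl
  · have hres := hR1 ⟨hn, fun v hv => hv⟩
    show solution nums = solution_alt nums
    rw [solutionA_eq, hres]
    rfl
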